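-- pv_equiv track=rewrite | github.com/mfasDa/powhegvar | checkPwgevents.py | decode_weightgroup
-- ===== SOURCE A (Python) =====
-- def decode_weightgroup(weightgroupinfo: str) -> tuple:
--     tokens = weightgroupinfo.lstrip("<").rstrip(">").split(" ")
--     name = ""
--     combine = ""
--     for tok in tokens:
--         if not "=" in tok:
--             continue
--         keyval = tok.split("=")
--         key = keyval[0]
--         value = keyval[1].lstrip("\'").rstrip("\'")
--         if key == "name":
--             name= value
--         elif key == "combine":
--             combine = value
--     return (name, combine)
-- ===== SOURCE B (Python) =====
-- def decode_weightgroup(weightgroupinfo: str) -> tuple: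
--     tokens = weightgroupinfo.lstrip("<").rstrip(">").split(" ")
--
--     def lookup(key):
--         # last assignment wins in A == first match scanning from the end
--         for tok in reversed(tokens):
--             if "=" in tok and tok.split("=")[0] == key:
--                 return tok.split("=")[1].strip("'")
--         return ""
--
--     return (lookup("name"), lookup("combine"))
-- ===== Notes on version B (the rewrite author's own statement) =====
-- stated objective: alternative
-- what changed: Replaces A's forward stateful loop (overwrite-on-each-match with if/elif dispatch) by two staged backward searches: for each key, find the first matching token scanning the reversed token list with early return.
import Mathlib
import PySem

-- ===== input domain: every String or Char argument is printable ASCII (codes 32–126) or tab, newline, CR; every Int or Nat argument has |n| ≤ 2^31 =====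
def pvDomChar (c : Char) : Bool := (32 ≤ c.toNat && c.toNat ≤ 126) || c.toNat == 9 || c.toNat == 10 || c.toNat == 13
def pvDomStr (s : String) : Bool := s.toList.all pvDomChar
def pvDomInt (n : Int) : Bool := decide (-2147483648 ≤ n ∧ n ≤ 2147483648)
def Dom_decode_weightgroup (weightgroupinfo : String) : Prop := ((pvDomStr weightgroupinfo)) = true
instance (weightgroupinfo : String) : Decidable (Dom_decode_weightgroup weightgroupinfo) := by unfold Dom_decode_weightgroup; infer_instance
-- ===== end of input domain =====

-- B replaces A's forward stateful overwrite loop by two staged backward first-match searches (objective: alternative, same cost).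


-- ===== PORT A =====
-- weightgroupinfo.lstrip("<").rstrip(">").split(" "): shared preprocessing, textually identical in A's and B's Python.
-- lstrip/rstrip of a single-character set is exactly dropWhile (on the reversed list for rstrip).
def dwTokens (weightgroupinfo : String) : List (List Char) :=
  PySem.Chars.splitOn
    (((weightgroupinfo.toList.dropWhile (· == '<')).reverse.dropWhile (· == '>')).reverse)
    [' ']

-- loop body of A: continue on tokens without '=', else split and dispatch on the key
def dwStep (st : List Char × List Char) (tok : List Char) : List Char × List Char :=
  if tok.contains '=' = false then st
  else
    let keyval := PySem.Chars.splitOn tok ['=']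
    let key := keyval.getD 0 []
    -- value = keyval[1].lstrip("'").rstrip("'"); keyval[1] exists since '=' ∈ tok
    let value := (((keyval.getD 1 []).dropWhile (· == '\'')).reverse.dropWhile (· == '\'')).reverse
    if key = "name".toList then (value, st.2)
    else if key = "combine".toList then (st.1, value)
    else st

def decode_weightgroup (weightgroupinfo : String) : String × String :=
  let r := (dwTokens weightgroupinfo).foldl dwStep ([], [])
  (String.ofList r.1, String.ofList r.2)

-- ===== PORT B =====
-- B's lookup(key): scan the reversed token list, return the value of the FIRST token whose key matches
-- (= the last assignment in source order); "" if none.  strip("'") is stripChars with the quote.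
def dwLookup (tokens : List (List Char)) (key : List Char) : List Char :=
  match tokens.reverse.find?
      (fun tok => tok.contains '=' && ((PySem.Chars.splitOn tok ['=']).getD 0 [] == key)) with
  | some tok => PySem.Chars.stripChars ((PySem.Chars.splitOn tok ['=']).getD 1 []) ['\'']
  | none => []

def decode_weightgroup_alt (weightgroupinfo : String) : String × String :=
  let tokens := dwTokens weightgroupinfo
  (String.ofList (dwLookup tokens "name".toList), String.ofList (dwLookup tokens "combine".toList))

-- ===== PRECONDITION & SPEC =====
def Spec_decode_weightgroup (weightgroupinfo : String) (out : String × String) : Prop := out = decode_weightgroup_alt weightgroupinfo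
instance (weightgroupinfo : String) (out : String × String) : Decidable (Spec_decode_weightgroup weightgroupinfo out) := by unfold Spec_decode_weightgroup; infer_instance

-- ===== CLAIM (what is proved, stated in full; the proofs are below) =====
def Claim_equal_decode_weightgroup : Prop := ∀ (weightgroupinfo : String), Dom_decode_weightgroup weightgroupinfo → Spec_decode_weightgroup weightgroupinfo (decode_weightgroup weightgroupinfo)

-- ===== LEMMAS AND PROOFS =====

-- proof-only helper: key/value pair of a token with '='
def dwPair (tok : List Char) : List Char × List Char :=
  let kv := PySem.Chars.splitOn tok ['=']
  (kv.getD 0 [], PySem.Chars.stripChars (kv.getD 1 []) ['\''])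

-- proof-only helper: last value bound to k, else fallback, as a left fold (mirrors A's overwrite loop)
def lastVal (ps : List (List Char × List Char)) (k fallback : List Char) : List Char :=
  ps.foldl (fun acc p => if p.1 = k then p.2 else acc) fallback

theorem stripChars_singleton (v : List Char) :
    PySem.Chars.stripChars v ['\''] =
      ((v.dropWhile (· == '\'')).reverse.dropWhile (· == '\'')).reverse := by
  have hp : (fun c => List.contains ['\''] c) = (fun c => c == '\'') := by
    funext c; by_cases h : c = '\'' <;> simp [h]
  simp only [PySem.Chars.stripChars, hp]

-- A's loop computes lastVal over the filtered, paired token list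
theorem foldl_dwStep_eq_lastVal (ts : List (List Char)) (n c : List Char) :
    ts.foldl dwStep (n, c) =
      (lastVal ((ts.filter (·.contains '=')).map dwPair) "name".toList n,
       lastVal ((ts.filter (·.contains '=')).map dwPair) "combine".toList c) := by
  induction ts generalizing n c with
  | nil => rfl
  | cons t rest ih =>
      by_cases h : t.contains '=' = false
      · simp only [List.foldl_cons, dwStep, h, List.filter_cons, ih]
        simp
      · have ht : t.contains '=' = true := by revert h; cases t.contains '=' <;> simp
        have hstep : dwStep (n, c) t =
            (if (dwPair t).1 = "name".toList then (dwPair t).2 else n,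
             if (dwPair t).1 = "combine".toList then (dwPair t).2 else c) := by
          simp only [dwStep, dwPair, ht, Bool.true_eq_false, stripChars_singleton]
          split_ifs with h1 h2 h2 <;> first | rfl | exact h1.elim | (rename_i ha hb; rw [ha] at hb; exact absurd hb (by decide))
        simp only [List.foldl_cons, hstep, ih, List.filter_cons, ht, if_pos,
          List.map_cons]
        simp [lastVal]

-- last-wins forward fold = first match on the reversed list
theorem lastVal_eq_find (ps : List (List Char × List Char)) (k f : List Char) :
    lastVal ps k f =
      match ps.reverse.find? (fun p => p.1 == k) with
      | some q => q.2
      | none => f := by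
  induction ps generalizing f with
  | nil => rfl
  | cons p rest ih =>
      simp only [lastVal, List.foldl_cons, List.reverse_cons, List.find?_append]
      rw [show (rest.foldl (fun acc q => if q.1 = k then q.2 else acc)
            (if p.1 = k then p.2 else f)) = lastVal rest k (if p.1 = k then p.2 else f) from rfl, ih]
      cases hfind : rest.reverse.find? (fun q => q.1 == k) with
      | some q => simp
      | none =>
          by_cases hk : p.1 = k
          · simp [hk]
          · have hb : (p.1 == k) = false := beq_eq_false_iff_ne.mpr hk
            simp only [hb, List.find?]
            rw [if_neg hk]
            rfl

-- find? over filter-then-map pulled back to a single find? with a fused predicate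
theorem find?_filter_map_dwPair (l : List (List Char)) (k : List Char) :
    ((l.filter (·.contains '=')).map dwPair).find? (fun p => p.1 == k)
      = (l.find? (fun tok => tok.contains '=' &&
          ((PySem.Chars.splitOn tok ['=']).getD 0 [] == k))).map
          (fun tok => dwPair tok) := by
  induction l with
  | nil => rfl
  | cons t rest ih =>
      cases h : t.contains '=' with
      | false =>
          have hm : '=' ∉ t := by simpa using h
          rw [List.filter_cons_of_neg (by simpa using h),
              List.find?_cons_of_neg (by simp [hm]), ih]
      | true =>
          have hm : '=' ∈ t := by simpa using h
          rw [List.filter_cons_of_pos (by simpa using h), List.map_cons]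
          by_cases hk : (PySem.Chars.splitOn t ['=']).getD 0 [] = k
          · have hk' : (PySem.Chars.splitOn t ['='])[0]?.getD [] = k := by
              simpa [List.getD] using hk
            rw [List.find?_cons_of_pos (by simp [dwPair, List.getD, hk']),
                List.find?_cons_of_pos (by simp [hm, hk'])]
            simp [dwPair]
          · have hk' : ¬ (PySem.Chars.splitOn t ['='])[0]?.getD [] = k := by
              simpa [List.getD] using hk
            rw [List.find?_cons_of_neg (by simp [dwPair, List.getD, hk']),
                List.find?_cons_of_neg (by simp [hm, hk']), ih]

theorem dwLookup_eq_lastVal (ts : List (List Char)) (k : List Char) :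
    dwLookup ts k = lastVal ((ts.filter (·.contains '=')).map dwPair) k [] := by
  rw [lastVal_eq_find]
  have hrev : ((ts.filter (·.contains '=')).map dwPair).reverse
      = ((ts.reverse.filter (·.contains '=')).map dwPair) := by
    rw [← List.map_reverse, List.filter_reverse]
  rw [hrev, find?_filter_map_dwPair]
  unfold dwLookup
  cases hfind : ts.reverse.find? (fun tok => tok.contains '=' &&
      ((PySem.Chars.splitOn tok ['=']).getD 0 [] == k)) with
  | none => simp
  | some tok => simp [dwPair]

-- ===== VERDICT (by name: the statement is the Claim_ definition above) =====
theorem decode_weightgroup_spec : Claim_equal_decode_weightgroup := by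
  unfold Claim_equal_decode_weightgroup
  intro w _
  show decode_weightgroup w = decode_weightgroup_alt w
  simp only [decode_weightgroup, decode_weightgroup_alt, foldl_dwStep_eq_lastVal,
    dwLookup_eq_lastVal]
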